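-- pv_equiv track=rewrite | github.com/hozh3497/CardKnowEdge | process_text.py | maybe_concat
-- ===== SOURCE A (Python) =====
-- def maybe_concat(pparts,maxlen=100):
-- 	# append strings to list as long as the len of the list
-- 	# is shorter than maxlen
-- 	# pparts is a list of smaller chuncks of stuff
-- 	outstring = []
-- 	while pparts:
-- 		string = '' # the sub-maxlen string
-- 		while len(string.split())<=maxlen and pparts:
-- 			pstr = pparts.pop(0)
-- 			string = string+" "+pstr
-- 			#if string[-1] not in set(['.','?','!']):
-- 			#	string+='.'
-- 		outstring.append(string)
-- 	return outstring
-- ===== SOURCE B (Python) =====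
-- def maybe_concat(pparts, maxlen=100):
--     # One pass: track the word count incrementally instead of re-splitting the
--     # growing string and pop(0)-ing the list.  Return value only: unlike A,
--     # this does not empty the caller's pparts list.
--     out = []
--     cur = ''   # '' = no open group (an open group always starts with ' ')
--     wc = 0     # number of words in cur
--     for p in pparts:
--         if cur and wc > maxlen:
--             out.append(cur)
--             cur, wc = '', 0
--         cur = cur + ' ' + p
--         wc += len(p.split())
--     if cur:
--         out.append(cur)
--     return out
-- ===== Notes on version B (the rewrite author's own statement) =====
-- stated objective: faster
-- what changed: Replaced A's nested while-loops that pop(0) from the list and re-split the whole growing string on every iteration by a single for-pass that tracks the group's word count incrementally (len(p.split()) per chunk, added once).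
import Mathlib
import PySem

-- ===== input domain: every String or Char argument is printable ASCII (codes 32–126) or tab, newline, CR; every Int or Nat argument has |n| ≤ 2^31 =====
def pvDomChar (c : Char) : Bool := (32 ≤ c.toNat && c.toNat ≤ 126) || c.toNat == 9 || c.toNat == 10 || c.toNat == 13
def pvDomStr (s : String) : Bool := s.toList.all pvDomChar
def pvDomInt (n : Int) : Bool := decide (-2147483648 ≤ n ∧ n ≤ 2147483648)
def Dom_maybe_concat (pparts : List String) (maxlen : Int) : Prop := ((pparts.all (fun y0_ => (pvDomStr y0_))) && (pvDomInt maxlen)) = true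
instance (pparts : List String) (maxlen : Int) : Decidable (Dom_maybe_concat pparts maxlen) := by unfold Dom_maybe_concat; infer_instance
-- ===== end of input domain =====

-- B replaces A's pop(0)/re-split nested loops by one pass that tracks the word count
-- incrementally (return value only: A empties the caller's pparts list, B does not).


-- ===== PORT A =====
-- inner 'while len(string.split())<=maxlen and pparts:' loop: returns (string, remaining pparts)
def maybeConcatInnerA (maxlen : Int) (string : String) : List String → String × List String
  | [] => (string, [])
  | pstr :: rest =>
      if ((PySem.Str.split₀ string).length : Int) ≤ maxlen then
        maybeConcatInnerA maxlen (string ++ " " ++ pstr) rest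
      else (string, pstr :: rest)

-- outer 'while pparts:' loop; fuel only makes the recursion total (A loops forever
-- when maxlen < 0 and pparts ≠ [], which Pre_ excludes); inside Pre_ each outer
-- iteration consumes at least one element, so pparts.length + 1 fuel is never exhausted
def maybeConcatOuterA (maxlen : Int) : Nat → List String → List String → List String
  | 0, _, outstring => outstring
  | _ + 1, [], outstring => outstring
  | fuel + 1, p :: rest, outstring =>
      match maybeConcatInnerA maxlen "" (p :: rest) with
      | (string, rest') => maybeConcatOuterA maxlen fuel rest' (outstring ++ [string])

def maybe_concat (pparts : List String) (maxlen : Int) : List String :=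
  maybeConcatOuterA maxlen (pparts.length + 1) pparts []

-- ===== PORT B =====
-- loop body of B's single 'for p in pparts:' pass; state = (out, cur, wc)
def maybeConcatStepB (maxlen : Int) (st : List String × String × Int) (p : String) :
    List String × String × Int :=
  match st with
  | (out, cur, wc) =>
      match (if cur ≠ "" ∧ maxlen < wc then (out ++ [cur], "", (0 : Int)) else (out, cur, wc)) with
      | (out, cur, wc) => (out, cur ++ " " ++ p, wc + ((PySem.Str.split₀ p).length : Int))

def maybe_concat_alt (pparts : List String) (maxlen : Int) : List String :=
  match pparts.foldl (maybeConcatStepB maxlen) ([], "", 0) with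
  | (out, cur, _) => if cur = "" then out else out ++ [cur]

-- ===== PRECONDITION & SPEC =====
-- Pre_ excludes maxlen < 0 with a nonempty pparts: there A's inner condition
-- len(''.split()) <= maxlen is false at once, so the outer loop appends '' forever
-- and A never returns (it diverges; it returns on every input Pre_ admits).
def Pre_maybe_concat (pparts : List String) (maxlen : Int) : Prop :=
  0 ≤ maxlen ∨ pparts = []
instance (pparts : List String) (maxlen : Int) : Decidable (Pre_maybe_concat pparts maxlen) := by unfold Pre_maybe_concat; infer_instance

def pvWitness_maybe_concat : List String × Int := (["hello world", "b c", "d"], 1)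

def Spec_maybe_concat (pparts : List String) (maxlen : Int) (out : List String) : Prop := out = maybe_concat_alt pparts maxlen
instance (pparts : List String) (maxlen : Int) (out : List String) : Decidable (Spec_maybe_concat pparts maxlen out) := by unfold Spec_maybe_concat; infer_instance

-- ===== CLAIM (what is proved, stated in full; the proofs are below) =====
def Claim_equal_maybe_concat : Prop := ∀ (pparts : List String) (maxlen : Int), Dom_maybe_concat pparts maxlen → Pre_maybe_concat pparts maxlen → Spec_maybe_concat pparts maxlen (maybe_concat pparts maxlen)

-- ===== LEMMAS AND PROOFS =====

-- split₀.go flushes its acc accumulator in front of the result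
theorem splitGo_acc (s : List Char) : ∀ cur acc,
    PySem.Chars.split₀.go s cur acc = acc.reverse ++ PySem.Chars.split₀.go s cur [] := by
  induction s with
  | nil =>
      intro cur acc
      simp only [PySem.Chars.split₀.go]
      by_cases h : cur.isEmpty
      · rw [if_pos h, if_pos h]; simp
      · rw [if_neg h, if_neg h]; simp
  | cons c rest ih =>
      intro cur acc
      simp only [PySem.Chars.split₀.go]
      by_cases hs : PySem.Chars.isspace c
      · by_cases h : cur.isEmpty
        · rw [if_pos hs, if_pos h, if_pos hs, if_pos h, ih]
        · rw [if_pos hs, if_neg h, if_pos hs, if_neg h,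
              ih [] (cur.reverse :: acc), ih [] [cur.reverse]]
          simp
      · rw [if_neg hs, if_neg hs, ih]

-- a space in the middle splits the word scan into two independent scans
theorem splitGo_space (a b : List Char) : ∀ cur,
    PySem.Chars.split₀.go (a ++ ' ' :: b) cur [] =
      PySem.Chars.split₀.go a cur [] ++ PySem.Chars.split₀.go b [] [] := by
  induction a with
  | nil =>
      intro cur
      rw [List.nil_append]
      simp only [PySem.Chars.split₀.go]
      have hs : PySem.Chars.isspace ' ' = true := by decide
      by_cases h : cur.isEmpty
      · rw [if_pos hs, if_pos h, if_pos h]; simp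
      · rw [if_pos hs, if_neg h, if_neg h, splitGo_acc b [] [cur.reverse]]
  | cons c rest ih =>
      intro cur
      rw [List.cons_append]
      simp only [PySem.Chars.split₀.go]
      by_cases hs : PySem.Chars.isspace c
      · by_cases h : cur.isEmpty
        · rw [if_pos hs, if_pos h, if_pos hs, if_pos h, ih]
        · rw [if_pos hs, if_neg h, if_pos hs, if_neg h,
              splitGo_acc (rest ++ ' ' :: b) [] [cur.reverse],
              splitGo_acc rest [] [cur.reverse], ih []]
          simp
      · rw [if_neg hs, if_neg hs, ih]

theorem split₀_append_space (a b : List Char) :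
    (PySem.Chars.split₀ (a ++ ' ' :: b)).length =
      (PySem.Chars.split₀ a).length + (PySem.Chars.split₀ b).length := by
  simp [PySem.Chars.split₀, splitGo_space]

-- word count of s + " " + p = word count of s + word count of p (Python str.split())
theorem wc_append (s p : String) :
    ((PySem.Str.split₀ (s ++ " " ++ p)).length : Int) =
      ((PySem.Str.split₀ s).length : Int) + ((PySem.Str.split₀ p).length : Int) := by
  have h : (s ++ " " ++ p).toList = s.toList ++ ' ' :: p.toList := by
    simp [String.toList_append]
  simp [PySem.Str.split₀, h, split₀_append_space]

theorem append_space_ne_empty (s p : String) : s ++ " " ++ p ≠ "" := by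
  intro h
  have := congrArg String.toList h
  simp [String.toList_append] at this

-- the main invariant: from an open group cur (≠ ""), A's remaining inner+outer loops
-- agree with B's remaining fold (B's wc is exactly the word count of cur)
theorem mainInv (maxlen : Int) (hml : 0 ≤ maxlen) :
    ∀ (pparts : List String) (fuel : Nat) (acc : List String) (cur : String),
      cur ≠ "" → pparts.length ≤ fuel →
      (match maybeConcatInnerA maxlen cur pparts with
       | (string, rest') => maybeConcatOuterA maxlen fuel rest' (acc ++ [string]))
      = (match pparts.foldl (maybeConcatStepB maxlen)
            (acc, cur, ((PySem.Str.split₀ cur).length : Int)) with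
         | (out, c, _) => if c = "" then out else out ++ [c]) := by
  intro pparts
  induction pparts with
  | nil =>
      intro fuel acc cur hcur _
      simp only [maybeConcatInnerA, List.foldl_nil]
      rw [if_neg hcur]
      cases fuel <;> rfl
  | cons p rest ih =>
      intro fuel acc cur hcur hfuel
      simp only [List.length_cons] at hfuel
      obtain ⟨f, rfl⟩ : ∃ f, fuel = f + 1 := ⟨fuel - 1, by omega⟩
      simp only [maybeConcatInnerA, List.foldl_cons]
      by_cases hle : ((PySem.Str.split₀ cur).length : Int) ≤ maxlen
      · -- B does not close the group; A keeps extending the same string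
        rw [if_pos hle]
        have hstep : maybeConcatStepB maxlen (acc, cur, ((PySem.Str.split₀ cur).length : Int)) p
            = (acc, cur ++ " " ++ p, ((PySem.Str.split₀ (cur ++ " " ++ p)).length : Int)) := by
          simp only [maybeConcatStepB]
          rw [if_neg (by push Not; intro _; omega), wc_append]
        rw [hstep]
        exact ih (f + 1) acc (cur ++ " " ++ p) (append_space_ne_empty cur p) (by omega)
      · -- group closes: A appends cur and restarts from "", B flushes cur
        rw [if_neg hle]
        have hstep : maybeConcatStepB maxlen (acc, cur, ((PySem.Str.split₀ cur).length : Int)) p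
            = (acc ++ [cur], "" ++ " " ++ p, ((PySem.Str.split₀ ("" ++ " " ++ p)).length : Int)) := by
          simp only [maybeConcatStepB]
          rw [if_pos ⟨hcur, by omega⟩, wc_append]
          simp
        rw [hstep]
        have houter : maybeConcatOuterA maxlen (f + 1) (p :: rest) (acc ++ [cur])
            = (match maybeConcatInnerA maxlen ("" ++ " " ++ p) rest with
               | (string, rest') => maybeConcatOuterA maxlen f rest' ((acc ++ [cur]) ++ [string])) := by
          simp only [maybeConcatOuterA, maybeConcatInnerA]
          rw [if_pos (by simpa [PySem.Str.split₀, PySem.Chars.split₀, PySem.Chars.split₀.go] using hml)]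
        rw [houter]
        exact ih f (acc ++ [cur]) ("" ++ " " ++ p) (append_space_ne_empty "" p) (by omega)

-- ===== VERDICT (by name: the statement is the Claim_ definition above) =====
theorem maybe_concat_spec : Claim_equal_maybe_concat := by
  intro pparts maxlen _ hpre
  unfold Spec_maybe_concat maybe_concat maybe_concat_alt
  cases pparts with
  | nil => rfl
  | cons p rest =>
      have hml : 0 ≤ maxlen := by
        rcases hpre with h | h
        · exact h
        · cases h
      have h0 : maybeConcatOuterA maxlen (rest.length + 1 + 1) (p :: rest) []
          = (match maybeConcatInnerA maxlen ("" ++ " " ++ p) rest with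
             | (string, rest') => maybeConcatOuterA maxlen (rest.length + 1) rest' ([] ++ [string])) := by
        simp only [maybeConcatOuterA, maybeConcatInnerA]
        rw [if_pos (by simpa [PySem.Str.split₀, PySem.Chars.split₀, PySem.Chars.split₀.go] using hml)]
      have hstep : maybeConcatStepB maxlen ([], "", 0) p
          = ([], "" ++ " " ++ p, ((PySem.Str.split₀ ("" ++ " " ++ p)).length : Int)) := by
        simp only [maybeConcatStepB]
        rw [if_neg (by simp), wc_append]
        simp [PySem.Str.split₀, PySem.Chars.split₀, PySem.Chars.split₀.go]
      simp only [List.length_cons, List.foldl_cons, hstep]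
      rw [h0]
      exact mainInv maxlen hml rest (rest.length + 1) [] ("" ++ " " ++ p)
        (append_space_ne_empty "" p) (by omega)
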